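-- pv_equiv track=rewrite | github.com/Vinokaa/Conjuntos | Conjuntos.py | strToSet
-- ===== SOURCE A (Python) =====
-- def strToSet(linha):
--     result = set([])
--     valor = ""
--     for i in range(len(linha)):
--         if linha[i] != ',' and linha[i] != " " and linha[i] != "\n":
--             valor += linha[i]
--         if linha[i] == ',' or linha[i] == '\n':
--             result.add(valor)
--             valor = ""
--     return result
-- ===== SOURCE B (Python) =====
-- def strToSet(linha):
--     parts = linha.replace(' ', '').replace('\n', ',').split(',')
--     return set(parts[:-1])
-- ===== Notes on version B (the rewrite author's own statement) =====
-- stated objective: faster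
-- what changed: Replaces the char-by-char accumulation loop with whole-string operations: strip spaces and map newlines to commas via replace, split on commas, and take the set of all parts but the last (the unterminated tail A discards).
import Mathlib
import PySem

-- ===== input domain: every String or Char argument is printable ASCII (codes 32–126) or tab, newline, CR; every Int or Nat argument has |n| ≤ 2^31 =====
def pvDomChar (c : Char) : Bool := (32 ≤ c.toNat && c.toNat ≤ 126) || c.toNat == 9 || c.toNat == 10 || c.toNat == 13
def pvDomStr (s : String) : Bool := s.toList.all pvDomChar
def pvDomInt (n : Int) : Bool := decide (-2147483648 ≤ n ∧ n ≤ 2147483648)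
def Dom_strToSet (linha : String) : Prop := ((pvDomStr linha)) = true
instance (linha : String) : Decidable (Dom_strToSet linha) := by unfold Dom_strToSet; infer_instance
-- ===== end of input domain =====

-- B replaces A's char-by-char accumulation loop with replace/split string operations
-- (drop spaces, turn newlines into commas, split on commas, set of all parts but the last).

-- ===== PORT A =====
-- A's loop state: the result set and the current token `valor` (a Python str, kept as List Char).
def strToSetStep (st : PySem.Set String × List Char) (c : Char) : PySem.Set String × List Char :=
  let valor := if c ≠ ',' ∧ c ≠ ' ' ∧ c ≠ '\n' then st.2 ++ [c] else st.2
  if c = ',' ∨ c = '\n' then (PySem.Set.add st.1 (String.ofList valor), [])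
  else (st.1, valor)

-- 'for i in range(len(linha)): … linha[i] …' visits the characters in order: a fold over them.
def strToSet (linha : String) : List String :=
  (linha.toList.foldl strToSetStep (PySem.Set.empty, [])).1

-- ===== PORT B =====
def strToSet_alt (linha : String) : List String :=
  PySem.Set.ofList (PySem.List.slice
    ((PySem.Str.split? (PySem.Str.replace (PySem.Str.replace linha " " "") "\n" ",") ",").getD [])
    none (some (-1)))   -- sep "," ≠ "": split? is always `some`; parts[:-1] is slice … (-1)

-- ===== PRECONDITION & SPEC =====
def Spec_strToSet (linha : String) (out : List String) : Prop := out = strToSet_alt linha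
instance (linha : String) (out : List String) : Decidable (Spec_strToSet linha out) := by unfold Spec_strToSet; infer_instance

-- ===== CLAIM (what is proved, stated in full; the proofs are below) =====
def Claim_equal_strToSet : Prop := ∀ (linha : String), Dom_strToSet linha → Spec_strToSet linha (strToSet linha)

-- ===== LEMMAS AND PROOFS =====

-- the cleaned character stream: spaces removed, newlines turned into commas
def pvClean (cs : List Char) : List Char :=
  (cs.filter (fun c => c ≠ ' ')).map (fun c => if c = '\n' then ',' else c)

-- splitting a character list on ',' (reference shape of str.split(','))
def pvSplitComma : List Char → List (List Char)
  | [] => [[]]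
  | c :: t => if c = ',' then [] :: pvSplitComma t else (pvSplitComma t).modifyHead (c :: ·)

theorem pvSplitComma_ne_nil (l : List Char) : pvSplitComma l ≠ [] := by
  cases l with
  | nil => simp [pvSplitComma]
  | cons c t =>
    simp only [pvSplitComma]
    split_ifs
    · simp
    · have := pvSplitComma_ne_nil t
      cases h : pvSplitComma t <;> simp_all [List.modifyHead]

theorem modifyHead_congr (f g : List Char → List Char) (h : ∀ x, f x = g x)
    (l : List (List Char)) : l.modifyHead f = l.modifyHead g := by
  cases l <;> simp [h]

theorem modifyHead_id (l : List (List Char)) : l.modifyHead (fun x => x) = l := by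
  cases l <;> simp

-- step equations for the fuelled PySem scanners, specialised to the literals used here
theorem rsp_nil (fuel : Nat) (acc : List Char) :
    PySem.Chars.replace.go [' '] [] fuel [] acc = acc.reverse := by
  cases fuel <;> simp [PySem.Chars.replace.go]

theorem rsp_cons (fuel : Nat) (c : Char) (t acc : List Char) :
    PySem.Chars.replace.go [' '] [] (fuel+1) (c :: t) acc =
      if c = ' ' then PySem.Chars.replace.go [' '] [] fuel t acc
      else PySem.Chars.replace.go [' '] [] fuel t (c :: acc) := by
  simp [PySem.Chars.replace.go, List.isPrefixOf]
  split_ifs <;> simp_all [eq_comm]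

theorem rnl_nil (fuel : Nat) (acc : List Char) :
    PySem.Chars.replace.go ['\n'] [','] fuel [] acc = acc.reverse := by
  cases fuel <;> simp [PySem.Chars.replace.go]

theorem rnl_cons (fuel : Nat) (c : Char) (t acc : List Char) :
    PySem.Chars.replace.go ['\n'] [','] (fuel+1) (c :: t) acc =
      if c = '\n' then PySem.Chars.replace.go ['\n'] [','] fuel t (',' :: acc)
      else PySem.Chars.replace.go ['\n'] [','] fuel t (c :: acc) := by
  simp [PySem.Chars.replace.go, List.isPrefixOf]
  split_ifs <;> simp_all [eq_comm]

theorem spl_nil (fuel : Nat) (cur : List Char) (acc : List (List Char)) :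
    PySem.Chars.splitOn.go [','] fuel [] cur acc = (cur.reverse :: acc).reverse := by
  cases fuel <;> simp [PySem.Chars.splitOn.go]

theorem spl_cons (fuel : Nat) (c : Char) (rest cur : List Char) (acc : List (List Char)) :
    PySem.Chars.splitOn.go [','] (fuel+1) (c :: rest) cur acc =
      if c = ',' then PySem.Chars.splitOn.go [','] fuel rest [] (cur.reverse :: acc)
      else PySem.Chars.splitOn.go [','] fuel rest (c :: cur) acc := by
  simp [PySem.Chars.splitOn.go, List.isPrefixOf]
  split_ifs <;> simp_all [eq_comm]

theorem replace_space_go (fuel : Nat) (l acc : List Char) (h : l.length ≤ fuel) :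
    PySem.Chars.replace.go [' '] [] fuel l acc = acc.reverse ++ l.filter (fun c => c ≠ ' ') := by
  induction fuel generalizing l acc with
  | zero =>
    have : l = [] := by cases l <;> simp_all
    subst this; simp [rsp_nil]
  | succ n ih =>
    cases l with
    | nil => simp [rsp_nil]
    | cons c t =>
      have ht : t.length ≤ n := by simpa using h
      rw [rsp_cons]
      by_cases hc : c = ' ' <;> simp [hc, ih _ _ ht]

theorem replace_nl_go (fuel : Nat) (l acc : List Char) (h : l.length ≤ fuel) :
    PySem.Chars.replace.go ['\n'] [','] fuel l acc
      = acc.reverse ++ l.map (fun c => if c = '\n' then ',' else c) := by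
  induction fuel generalizing l acc with
  | zero =>
    have : l = [] := by cases l <;> simp_all
    subst this; simp [rnl_nil]
  | succ n ih =>
    cases l with
    | nil => simp [rnl_nil]
    | cons c t =>
      have ht : t.length ≤ n := by simpa using h
      rw [rnl_cons]
      by_cases hc : c = '\n' <;> simp [hc, ih _ _ ht]

theorem split_go (fuel : Nat) (l cur : List Char) (acc : List (List Char)) (h : l.length ≤ fuel) :
    PySem.Chars.splitOn.go [','] fuel l cur acc
      = acc.reverse ++ (pvSplitComma l).modifyHead (cur.reverse ++ ·) := by
  induction fuel generalizing l cur acc with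
  | zero =>
    have : l = [] := by cases l <;> simp_all
    subst this; simp [spl_nil, pvSplitComma]
  | succ n ih =>
    cases l with
    | nil => simp [spl_nil, pvSplitComma]
    | cons c t =>
      have ht : t.length ≤ n := by simpa using h
      rw [spl_cons]
      by_cases hc : c = ','
      · subst hc
        simp only [pvSplitComma, ih _ _ _ ht]
        rw [modifyHead_congr (fun x => ([] : List Char).reverse ++ x) (fun x => x) (by simp),
          modifyHead_id]
        simp
      · simp only [ih _ _ _ ht, pvSplitComma, if_neg hc, List.modifyHead_modifyHead]
        rw [modifyHead_congr ((fun x => cur.reverse ++ x) ∘ (fun x => c :: x))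
          (fun x => (c :: cur).reverse ++ x) (by intro x; simp)]

theorem replace_space_eq (cs : List Char) :
    PySem.Chars.replace cs [' '] [] = cs.filter (fun c => c ≠ ' ') := by
  simpa using replace_space_go cs.length cs [] le_rfl

theorem replace_nl_eq (cs : List Char) :
    PySem.Chars.replace cs ['\n'] [','] = cs.map (fun c => if c = '\n' then ',' else c) := by
  simpa using replace_nl_go cs.length cs [] le_rfl

theorem split_comma_eq (cs : List Char) :
    PySem.Chars.split? cs [','] = some (pvSplitComma cs) := by
  simp only [PySem.Chars.split?, PySem.Chars.splitOn]
  rw [split_go (cs.length + 1) cs [] [] (by omega)]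
  rw [modifyHead_congr (fun x => ([] : List Char).reverse ++ x) (fun x => x) (by simp),
    modifyHead_id]
  simp

-- A's fold, characterised by the comma-split of the cleaned stream
theorem foldA_eq (cs : List Char) (s : PySem.Set String) (v : List Char) :
    (cs.foldl strToSetStep (s, v)).1
      = PySem.Set.update s
          ((((pvSplitComma (pvClean cs)).modifyHead (v ++ ·)).dropLast).map String.ofList) := by
  induction cs generalizing s v with
  | nil => simp [pvClean, pvSplitComma, PySem.Set.update]
  | cons c t ih =>
    by_cases hsp : c = ' '
    · subst hsp
      have : strToSetStep (s, v) ' ' = (s, v) := by simp [strToSetStep]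
      simp only [List.foldl_cons, this, ih, pvClean, List.filter_cons]
      simp [pvClean]
    · by_cases hd : c = ',' ∨ c = '\n'
      · have hstep : strToSetStep (s, v) c = (PySem.Set.add s (String.ofList v), []) := by
          rcases hd with h | h <;> subst h <;> simp [strToSetStep]
        have hclean : pvClean (c :: t) = ',' :: pvClean t := by
          rcases hd with h | h <;> subst h <;> simp [pvClean, List.filter_cons]
        simp only [List.foldl_cons, hstep, ih, hclean, pvSplitComma, if_pos rfl]
        obtain ⟨p, ps, hps⟩ : ∃ p ps, pvSplitComma (pvClean t) = p :: ps := by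
          cases h : pvSplitComma (pvClean t) with
          | nil => exact absurd h (pvSplitComma_ne_nil _)
          | cons p ps => exact ⟨p, ps, rfl⟩
        simp [hps, PySem.Set.update, List.modifyHead]
      · push Not at hd
        have hstep : strToSetStep (s, v) c = (s, v ++ [c]) := by
          simp [strToSetStep, hd.1, hd.2, hsp]
        have hclean : pvClean (c :: t) = c :: pvClean t := by
          simp [pvClean, List.filter_cons, hsp, hd.2]
        simp only [List.foldl_cons, hstep, ih, hclean, pvSplitComma, if_neg hd.1,
          List.modifyHead_modifyHead]
        rw [modifyHead_congr ((fun x => v ++ x) ∘ (fun x => c :: x))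
          (fun x => v ++ [c] ++ x) (by intro x; simp)]

-- ===== VERDICT (by name: the statement is the Claim_ definition above) =====
theorem strToSet_spec : Claim_equal_strToSet := by
  intro linha _
  unfold Spec_strToSet strToSet strToSet_alt
  -- the cleaned string that B builds
  have hrep : (PySem.Str.replace (PySem.Str.replace linha " " "") "\n" ",").toList
      = pvClean linha.toList := by
    simp only [PySem.Str.toList_replace]
    have h1 : (" " : String).toList = [' '] := rfl
    have h2 : ("" : String).toList = [] := rfl
    have h3 : ("\n" : String).toList = ['\n'] := rfl
    have h4 : ("," : String).toList = [','] := rfl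
    rw [h1, h2, h3, h4, replace_space_eq, replace_nl_eq]
    rfl
  -- B's split, via the Chars bridge
  have hsplit : ∃ ps : List String,
      PySem.Str.split? (PySem.Str.replace (PySem.Str.replace linha " " "") "\n" ",") "," = some ps
      ∧ ps.map String.toList = pvSplitComma (pvClean linha.toList) := by
    have hb := PySem.Str.split?_map (PySem.Str.replace (PySem.Str.replace linha " " "") "\n" ",") ","
    rw [hrep] at hb
    have h4 : ("," : String).toList = [','] := rfl
    rw [h4, split_comma_eq] at hb
    cases hps : PySem.Str.split? (PySem.Str.replace (PySem.Str.replace linha " " "") "\n" ",") "," with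
    | none => rw [hps] at hb; simp at hb
    | some ps =>
      rw [hps] at hb; simp at hb
      exact ⟨ps, rfl, hb⟩
  obtain ⟨ps, hps, hmap⟩ := hsplit
  rw [foldA_eq, hps]
  simp only [Option.getD_some, PySem.List.slice_to_neg_one]
  have hps' : ps = (pvSplitComma (pvClean linha.toList)).map String.ofList := by
    rw [← hmap, List.map_map]
    simp [Function.comp_def]
  rw [hps', ← List.map_dropLast]
  rw [modifyHead_congr (fun p => [] ++ p) (fun p => p) (by simp), modifyHead_id]
  rfl
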